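-- pv_equiv track=rewrite | github.com/mikhaylova-daria/NER | CorpusBuilder/allFunctions.py | findEndOfWord
-- ===== SOURCE A (Python) =====
-- def findEndOfWord(s,word,position):
--     w = position
--     k = word.count(' ')
--     i = 0
--     while i<=k:
--         w += 1
--         if s[w]in[' ','\n', u'\xa0']:
--             i += 1
--     w -= 1
--     while s[w] in [',', '.', '!', '?', ':', ';', ')', '\u0027']:
--         w -= 1
--
--     return w-position+1
-- ===== SOURCE B (Python) =====
-- def findEndOfWord(s, word, position):
--     # build-boundaries-then-select decomposition instead of A's incremental counter scan
--     spaces = word.count(' ')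
--     bounds = [i for i in range(position + 1, len(s)) if s[i] in ' \n\xa0']
--     w = bounds[spaces] - 1
--     while s[w] in ",.!?:;)'":
--         w -= 1
--     return w - position + 1
-- ===== Notes on version B (the rewrite author's own statement) =====
-- stated objective: alternative
-- what changed: A's single incremental scan with a whitespace counter is replaced by a build-then-select decomposition: B builds the list of whitespace-boundary indices after position in one comprehension, selects the (spaces+1)-th as the boundary, and then strips trailing punctuation from it.
import Mathlib
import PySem

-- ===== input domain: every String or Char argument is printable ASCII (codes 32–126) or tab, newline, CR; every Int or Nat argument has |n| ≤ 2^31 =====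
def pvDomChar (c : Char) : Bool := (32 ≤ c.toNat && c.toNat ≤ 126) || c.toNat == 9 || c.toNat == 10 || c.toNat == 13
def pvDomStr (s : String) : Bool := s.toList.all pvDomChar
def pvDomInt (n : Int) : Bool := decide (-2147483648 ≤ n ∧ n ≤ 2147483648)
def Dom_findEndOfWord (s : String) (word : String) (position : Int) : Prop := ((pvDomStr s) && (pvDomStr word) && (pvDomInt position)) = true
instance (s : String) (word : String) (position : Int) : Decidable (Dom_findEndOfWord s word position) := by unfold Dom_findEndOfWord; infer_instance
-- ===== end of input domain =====

-- B builds the list of whitespace-boundary indices after `position` and selects the (spaces+1)-th,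
-- replacing A's incremental counter scan (alternative decomposition, same behaviour wherever A returns).

-- ===== PORT A =====
-- while s[w] in [',','.','!','?',':',';',')','\u0027']: w -= 1   (fuel only makes the loop total; a raise yields junk, outside Pre_)
def pvBackA (l : List Char) : Nat → Int → Int
  | 0, w => w
  | fuel + 1, w =>
    match PySem.List.pyGet? l w with
    | none => w
    | some c => if c ∈ [',', '.', '!', '?', ':', ';', ')', '\u0027'] then pvBackA l fuel (w - 1) else w

-- while i <= k: w += 1; if s[w] in [' ','\n','\xa0']: i += 1   (none = IndexError)
def pvFwdA (l : List Char) (k : Int) : Nat → Int → Int → Option Int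
  | 0, _, _ => none
  | fuel + 1, i, w =>
    if i ≤ k then
      match PySem.List.pyGet? l (w + 1) with
      | none => none
      | some c => pvFwdA l k fuel (if c ∈ [' ', '\n', '\u00A0'] then i + 1 else i) (w + 1)
    else some w

def findEndOfWord (s : String) (word : String) (position : Int) : Int :=
  match pvFwdA s.toList (PySem.Str.count word " " : Int)
      (s.toList.length + s.toList.length + position.natAbs + PySem.Str.count word " " + 2) 0 position with
  | none => 0  -- Python raises IndexError here (outside Pre_)
  | some w => pvBackA s.toList (s.toList.length + s.toList.length + 2) (w - 1) - position + 1

-- ===== PORT B =====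
def pvBackB (l : List Char) : Nat → Int → Int
  | 0, w => w
  | fuel + 1, w =>
    match PySem.List.pyGet? l w with
    | none => w
    | some c => if c ∈ ",.!?:;)'".toList then pvBackB l fuel (w - 1) else w

-- bounds = [i for i in range(position+1, len(s)) if s[i] in ' \n\xa0']  (an out-of-range s[i] = Python raise, outside Pre_)
def findEndOfWord_alt (s : String) (word : String) (position : Int) : Int :=
  match PySem.List.pyGet?
      ((PySem.List.pyRange (position + 1) s.toList.length 1).filterMap
        (fun i => match PySem.List.pyGet? s.toList i with
          | none => none
          | some c => if c ∈ " \n\u00A0".toList then some i else none))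
      (PySem.Str.count word " " : Int) with
  | none => 0  -- Python raises IndexError here (outside Pre_)
  | some b => pvBackB s.toList (s.toList.length + s.toList.length + 2) (b - 1) - position + 1

-- ===== PRECONDITION & SPEC =====
-- Pre_ is exactly the set of inputs on which the Python A returns normally: the scan must start no lower
-- than index -len(s)-1+1, find spaces+1 whitespace boundaries before running off the end, and the punctuation
-- back-off from the selected boundary must hit a non-punctuation character before falling below index -len(s).
def Pre_findEndOfWord (s : String) (word : String) (position : Int) : Prop :=
  let l := s.toList
  let spaces : Nat := PySem.Str.count word " "
  let bounds := (PySem.List.pyRange (position + 1) l.length 1).filterMap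
    (fun i => match PySem.List.pyGet? l i with
      | none => none
      | some c => if c ∈ " \n\u00A0".toList then some i else none);
  (-((l.length : Int) + 1) ≤ position) ∧ (spaces < bounds.length) ∧
    (0 ≤ bounds.getD spaces 0 ∨
      ¬ (l.take ((l.length + bounds.getD spaces 0).toNat)).all
          (fun c => c ∈ ",.!?:;)'".toList) = true)
instance (s : String) (word : String) (position : Int) : Decidable (Pre_findEndOfWord s word position) := by unfold Pre_findEndOfWord; infer_instance

def pvWitness_findEndOfWord : String × String × Int := ("he wo rld ", "he wo", 0)

def Spec_findEndOfWord (s : String) (word : String) (position : Int) (out : Int) : Prop := out = findEndOfWord_alt s word position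
instance (s : String) (word : String) (position : Int) (out : Int) : Decidable (Spec_findEndOfWord s word position out) := by unfold Spec_findEndOfWord; infer_instance

-- ===== CLAIM (what is proved, stated in full; the proofs are below) =====
def Claim_equal_findEndOfWord : Prop := ∀ (s : String) (word : String) (position : Int), Dom_findEndOfWord s word position → Pre_findEndOfWord s word position → Spec_findEndOfWord s word position (findEndOfWord s word position)

-- ===== LEMMAS AND PROOFS =====

-- the two punctuation back-off loops are the same recursion over the same character set
theorem pvBack_eq (l : List Char) : ∀ (fuel : Nat) (w : Int), pvBackA l fuel w = pvBackB l fuel w := by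
  intro fuel
  induction fuel with
  | zero => intro w; rfl
  | succ n ih =>
    intro w
    simp only [pvBackA, pvBackB]
    cases PySem.List.pyGet? l w with
    | none => rfl
    | some c => simp only [ih]; rfl

-- B's boundary list, parameterised by the start of the remaining index range
def pvBounds (l : List Char) (a : Int) : List Int :=
  (PySem.List.pyRange a l.length 1).filterMap
    (fun i => match PySem.List.pyGet? l i with
      | none => none
      | some c => if c ∈ " \n\u00A0".toList then some i else none)

theorem pvWs_eq : " \n\u00A0".toList = [' ', '\n', '\u00A0'] := by decide

theorem pvBounds_empty (l : List Char) (a : Int) (h : (l.length : Int) ≤ a) : pvBounds l a = [] := by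
  unfold pvBounds
  rw [PySem.List.pyRange_one_eq_nil h]
  rfl

theorem pvBounds_cons (l : List Char) (a : Int) (c : Char) (h : a < (l.length : Int))
    (hc : PySem.List.pyGet? l a = some c) :
    pvBounds l a = (if c ∈ [' ', '\n', '\u00A0'] then [a] else []) ++ pvBounds l (a + 1) := by
  unfold pvBounds
  rw [PySem.List.pyRange_one_cons h, List.filterMap_cons, hc, pvWs_eq]
  by_cases hmem : c ∈ [' ', '\n', '\u00A0'] <;> simp [hmem]

-- the incremental scan of A, started with counter i and cursor w, returns the (k-i+1)-th boundary after w
theorem pvFwd_ok (l : List Char) (k : Int) :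
    ∀ (fuel : Nat) (i w : Int), i ≤ k → -(l.length : Int) ≤ w + 1 →
    ((l.length : Int) - (w + 1)) < (fuel : Int) →
    (k - i).toNat < (pvBounds l (w + 1)).length →
    pvFwdA l k fuel i w = (pvBounds l (w + 1))[(k - i).toNat]? := by
  intro fuel
  induction fuel with
  | zero =>
    intro i w _ _ hfuel hlen
    exfalso
    rw [pvBounds_empty l _ (by omega : (l.length : Int) ≤ w + 1)] at hlen
    simp at hlen
  | succ n ih =>
    intro i w hik hlo hfuel hlen
    have hlt : w + 1 < (l.length : Int) := by
      by_contra hge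
      rw [pvBounds_empty l (w + 1) (by omega)] at hlen
      simp at hlen
    obtain ⟨c, hc⟩ : ∃ c, PySem.List.pyGet? l (w + 1) = some c := by
      cases hg : PySem.List.pyGet? l (w + 1) with
      | some c => exact ⟨c, rfl⟩
      | none =>
        rw [PySem.List.pyGet?_eq_none_iff] at hg
        exact absurd (by simp [PySem.Raise.InRange]; omega) hg
    simp only [pvFwdA, if_pos hik, hc]
    rw [pvBounds_cons l (w + 1) c hlt hc] at hlen ⊢
    by_cases hmem : c ∈ [' ', '\n', '\u00A0']
    · simp only [if_pos hmem] at hlen ⊢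
      simp only [List.cons_append, List.nil_append] at hlen ⊢
      by_cases hik' : i = k
      · subst hik'
        obtain ⟨m, rfl⟩ : ∃ m, n = m + 1 := ⟨n - 1, by omega⟩
        simp only [pvFwdA]
        rw [if_neg (by omega)]
        simp
      · have hidx : (k - i).toNat = (k - (i + 1)).toNat + 1 := by omega
        rw [hidx, List.getElem?_cons_succ]
        have hlen' : (k - (i + 1)).toNat < (pvBounds l (w + 1 + 1)).length := by
          rw [hidx] at hlen; simpa using hlen
        exact ih (i + 1) (w + 1) (by omega) (by omega) (by omega) hlen'
    · simp only [if_neg hmem, List.nil_append] at hlen ⊢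
      exact ih i (w + 1) hik (by omega) (by omega) hlen

-- ===== VERDICT (by name: the statement is the Claim_ definition above) =====
theorem findEndOfWord_spec : Claim_equal_findEndOfWord := by
  intro s word position _ hpre
  unfold Spec_findEndOfWord findEndOfWord findEndOfWord_alt
  simp only [Pre_findEndOfWord] at hpre
  obtain ⟨h1, h2, _⟩ := hpre
  have hbounds : ((PySem.List.pyRange (position + 1) (s.toList.length : Int) 1).filterMap
      (fun i => match PySem.List.pyGet? s.toList i with
        | none => none
        | some c => if c ∈ " \n\u00A0".toList then some i else none)) = pvBounds s.toList (position + 1) := rfl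
  rw [hbounds] at h2 ⊢
  have hk0 : ((PySem.Str.count word " " : Int) - 0).toNat = PySem.Str.count word " " := by omega
  have hfwd := pvFwd_ok s.toList (PySem.Str.count word " " : Int)
      (s.toList.length + s.toList.length + position.natAbs + PySem.Str.count word " " + 2)
      0 position (by positivity) (by omega) (by omega) (by rw [hk0]; exact h2)
  rw [hk0] at hfwd
  rw [hfwd, PySem.List.pyGet?_natCast]
  rw [show (pvBounds s.toList (position + 1))[PySem.Str.count word " "]? =
      some ((pvBounds s.toList (position + 1))[PySem.Str.count word " "]'h2) from List.getElem?_eq_getElem h2]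
  simp only [pvBack_eq]
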